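-- pv_equiv track=rewrite | github.com/djudju12/aulas | fabrica-software/algoritmos-performance/algortimosItem4.py | insertion_sort_comparasoes
-- ===== SOURCE A (Python) =====
-- def insertion_sort_comparasoes(vetor):
--     comparacoes, trocas = 0, 0
--     for i in range(1, len(vetor)):
--         chave = vetor[i]
--
--         j, c = bisect_left2(vetor, chave, 0, i)
--         comparacoes += c
--
--         trocas += 1
--         vetor[j+1:i+1] = vetor[j:i]
--
--         trocas += 1
--         vetor[j] = chave
--
--     return comparacoes, trocas
--
-- def bisect_left2(a, x, lo=0, hi=None):
--     """Return the index where to insert item x in list a, assuming a is sorted.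
--
--     The return value i is such that all e in a[:i] have e < x, and all e in
--     a[i:] have e >= x.  So if x already appears in the list, a.insert(i, x) will
--     insert just before the leftmost x already there.
--
--     Optional args lo (default 0) and hi (default len(a)) bound the
--     slice of a to be searched.
--     """
--     comparacoes = 0
--
--
--     comparacoes += 1
--     if lo < 0:
--         raise ValueError('lo must be non-negative')
--     comparacoes += 1
--
--     if hi is None:
--         hi = len(a)
--
--     while lo < hi:
--         mid = (lo + hi) // 2
--         comparacoes += 1
--         if a[mid] < x:
--             lo = mid + 1
--         else:
--             hi = mid
--
--     return lo, comparacoes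
-- ===== SOURCE B (Python) =====
-- # B: computes the same (comparacoes, trocas) without mutating/searching the array.
-- # For each i, the insertion point j equals the number of earlier elements < vetor[i]
-- # (the sorted prefix is a permutation of the original prefix), and the binary search's
-- # comparison count depends only on (i, j), so it is simulated on indices alone.
-- # Note: A sorts vetor in place; B leaves vetor untouched (return value is identical).
--
-- def search_steps(hi, j):
--     """Number of iterations of A's binary search over [0, hi) that lands on j."""
--     lo = 0
--     c = 0
--     while lo < hi:
--         mid = (lo + hi) // 2
--         c += 1
--         if mid < j:
--             lo = mid + 1
--         else:
--             hi = mid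
--     return c
--
-- def insertion_sort_comparasoes(vetor):
--     n = len(vetor)
--     comparacoes = 0
--     for i in range(1, n):
--         x = vetor[i]
--         j = 0
--         for y in vetor[:i]:
--             if y < x:
--                 j += 1
--         comparacoes += 2 + search_steps(i, j)
--     trocas = 2 * (n - 1) if n > 1 else 0
--     return comparacoes, trocas
-- ===== Notes on version B (the rewrite author's own statement) =====
-- stated objective: alternative
-- what changed: B drops A's in-place binary-insertion simulation entirely: the insertion index is a direct count of earlier smaller elements over the untouched input prefix, the binary search's comparison count is replayed on indices only (it depends only on (i, j)), and trocas is the closed form 2*(n-1); B never mutates or searches the array.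
import Mathlib
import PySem

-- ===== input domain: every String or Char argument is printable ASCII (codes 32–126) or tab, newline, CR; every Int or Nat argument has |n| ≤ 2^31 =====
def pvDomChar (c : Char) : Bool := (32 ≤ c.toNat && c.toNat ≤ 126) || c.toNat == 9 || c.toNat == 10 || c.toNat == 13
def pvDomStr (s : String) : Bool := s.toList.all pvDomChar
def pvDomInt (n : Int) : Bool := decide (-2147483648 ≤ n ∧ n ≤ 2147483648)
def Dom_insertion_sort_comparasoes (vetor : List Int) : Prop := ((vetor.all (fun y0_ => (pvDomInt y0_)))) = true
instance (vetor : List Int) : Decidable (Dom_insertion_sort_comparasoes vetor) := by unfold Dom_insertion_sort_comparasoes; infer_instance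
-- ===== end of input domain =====

-- B replaces A's in-place binary-insertion simulation by direct counting: insertion index = count of
-- earlier smaller elements, comparison count replayed on indices only, trocas = 2*(n-1) in closed form.
-- A sorts `vetor` in place; B leaves it untouched — the equivalence proved here is about the return value.


-- ===== PORT A =====
-- the `while lo < hi` loop of bisect_left2, carrying the comparison counter c;
-- a[mid] is always in range at A's call sites (0 ≤ lo ≤ mid < hi ≤ len a), so pyGetD is exact here
def pvBisectLoop (a : List Int) (x : Int) (lo hi c : Int) : Int × Int :=
  if h : lo < hi then
    let mid := PySem.Int.floordiv (lo + hi) 2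
    if PySem.List.pyGetD a mid 0 < x then
      pvBisectLoop a x (mid + 1) hi (c + 1)
    else
      pvBisectLoop a x lo mid (c + 1)
  else (lo, c)
termination_by (hi - lo).toNat
decreasing_by
  · have h1 := (PySem.Int.floordiv_two_mid_bounds (le_of_lt h)).1
    have h2 : PySem.Int.floordiv (lo + hi) 2 < hi := by
      rw [PySem.Int.floordiv_lt_iff_lt_mul (by norm_num)]; omega
    omega
  · have h1 := (PySem.Int.floordiv_two_mid_bounds (le_of_lt h)).1
    have h2 : PySem.Int.floordiv (lo + hi) 2 < hi := by
      rw [PySem.Int.floordiv_lt_iff_lt_mul (by norm_num)]; omega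
    omega

-- one iteration of A's outer for-loop; state = (vetor, comparacoes, trocas).
-- bisect_left2(vetor, chave, 0, i): lo = 0, so the `lo < 0` ValueError is unreachable and
-- comparacoes enters the while loop already equal to 2.
-- `vetor[j+1:i+1] = vetor[j:i]` (equal-length slices) is vetor[:j+1] ++ vetor[j:i] ++ vetor[i+1:];
-- then `vetor[j] = chave` with 0 ≤ j, always in range.
def pvStepA (st : List Int × Int × Int) (i : Int) : List Int × Int × Int :=
  let chave := PySem.List.pyGetD st.1 i 0
  let r := pvBisectLoop st.1 chave 0 i 2
  let w := PySem.List.slice st.1 none (some (r.1 + 1)) ++ PySem.List.slice st.1 (some r.1) (some i)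
           ++ PySem.List.slice st.1 (some (i + 1)) none
  (PySem.List.pySetD w r.1 chave, st.2.1 + r.2, st.2.2 + 1 + 1)

def insertion_sort_comparasoes (vetor : List Int) : Int × Int :=
  let st := (PySem.List.pyRange 1 (vetor.length : Int) 1).foldl pvStepA (vetor, 0, 0)
  (st.2.1, st.2.2)

-- ===== PORT B =====
-- Source B's search_steps while-loop, counting in c
def pvStepsLoop (lo hi j c : Int) : Int :=
  if h : lo < hi then
    let mid := PySem.Int.floordiv (lo + hi) 2
    if mid < j then pvStepsLoop (mid + 1) hi j (c + 1)
    else pvStepsLoop lo mid j (c + 1)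
  else c
termination_by (hi - lo).toNat
decreasing_by
  · have h1 := (PySem.Int.floordiv_two_mid_bounds (le_of_lt h)).1
    have h2 : PySem.Int.floordiv (lo + hi) 2 < hi := by
      rw [PySem.Int.floordiv_lt_iff_lt_mul (by norm_num)]; omega
    omega
  · have h1 := (PySem.Int.floordiv_two_mid_bounds (le_of_lt h)).1
    have h2 : PySem.Int.floordiv (lo + hi) 2 < hi := by
      rw [PySem.Int.floordiv_lt_iff_lt_mul (by norm_num)]; omega
    omega

def pvSearchSteps (hi j : Int) : Int := pvStepsLoop 0 hi j 0

-- one iteration of Source B's outer for-loop (accumulator = comparacoes)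
def pvStepB (vetor : List Int) (comparacoes : Int) (i : Int) : Int :=
  let x := PySem.List.pyGetD vetor i 0
  let j := (PySem.List.slice vetor none (some i)).foldl (fun j y => if y < x then j + 1 else j) (0 : Int)
  comparacoes + 2 + pvSearchSteps i j

def insertion_sort_comparasoes_alt (vetor : List Int) : Int × Int :=
  let n : Int := vetor.length
  let comparacoes := (PySem.List.pyRange 1 n 1).foldl (pvStepB vetor) 0
  let trocas := if n > 1 then 2 * (n - 1) else 0
  (comparacoes, trocas)

-- ===== PRECONDITION & SPEC =====
def Spec_insertion_sort_comparasoes (vetor : List Int) (out : Int × Int) : Prop := out = insertion_sort_comparasoes_alt vetor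
instance (vetor : List Int) (out : Int × Int) : Decidable (Spec_insertion_sort_comparasoes vetor out) := by unfold Spec_insertion_sort_comparasoes; infer_instance

-- ===== CLAIM (what is proved, stated in full; the proofs are below) =====
def Claim_equal_insertion_sort_comparasoes : Prop := ∀ (vetor : List Int), Dom_insertion_sort_comparasoes vetor → Spec_insertion_sort_comparasoes vetor (insertion_sort_comparasoes vetor)

-- ===== LEMMAS AND PROOFS =====

-- pvStepsLoop only adds iterations onto c
lemma pvStepsLoop_shift : ∀ (n : ℕ) (lo hi j c : Int), (hi - lo).toNat = n →
    pvStepsLoop lo hi j c = c + pvStepsLoop lo hi j 0 := by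
  intro n
  induction n using Nat.strong_induction_on with
  | _ n ih =>
    intro lo hi j c hn
    rw [pvStepsLoop, pvStepsLoop]
    by_cases h : lo < hi
    · have h1 := (PySem.Int.floordiv_two_mid_bounds (le_of_lt h)).1
      have h2 : PySem.Int.floordiv (lo + hi) 2 < hi := by
        rw [PySem.Int.floordiv_lt_iff_lt_mul (by norm_num)]; omega
      simp only [dif_pos h]
      set mid := PySem.Int.floordiv (lo + hi) 2 with hmid
      by_cases hj : mid < j
      · rw [if_pos hj, if_pos hj,
          ih (hi - (mid + 1)).toNat (by omega) (mid + 1) hi j (c + 1) rfl,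
          ih (hi - (mid + 1)).toNat (by omega) (mid + 1) hi j (0 + 1) rfl]
        ring
      · rw [if_neg hj, if_neg hj,
          ih (mid - lo).toNat (by omega) lo mid j (c + 1) rfl,
          ih (mid - lo).toNat (by omega) lo mid j (0 + 1) rfl]
        ring
    · simp [h]

-- On a region where "a[m] < x ↔ m < j", A's binary search returns j and counts exactly
-- the index-only simulation's iterations.
lemma pvBisectLoop_eq (a : List Int) (x j : Int) :
    ∀ (n : ℕ) (lo hi c : Int), (hi - lo).toNat = n → 0 ≤ lo → lo ≤ j → j ≤ hi →
    (∀ m : Int, lo ≤ m → m < hi → (PySem.List.pyGetD a m 0 < x ↔ m < j)) →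
    pvBisectLoop a x lo hi c = (j, pvStepsLoop lo hi j c) := by
  intro n
  induction n using Nat.strong_induction_on with
  | _ n ih =>
    intro lo hi c hn h0 hlo hhi hmem
    rw [pvBisectLoop, pvStepsLoop]
    by_cases h : lo < hi
    · have h1 := (PySem.Int.floordiv_two_mid_bounds (le_of_lt h)).1
      have h2 : PySem.Int.floordiv (lo + hi) 2 < hi := by
        rw [PySem.Int.floordiv_lt_iff_lt_mul (by norm_num)]; omega
      simp only [dif_pos h]
      set mid := PySem.Int.floordiv (lo + hi) 2 with hmid
      have hiff := hmem mid h1 h2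
      by_cases hj : mid < j
      · rw [if_pos (hiff.mpr hj), if_pos hj]
        exact ih (hi - (mid + 1)).toNat (by omega) (mid + 1) hi (c + 1) rfl (by omega)
          (by omega) hhi (fun m hm1 hm2 => hmem m (by omega) hm2)
      · rw [if_neg (fun hx => hj (hiff.mp hx)), if_neg hj]
        exact ih (mid - lo).toNat (by omega) lo mid (c + 1) rfl h0 hlo (by omega)
          (fun m hm1 hm2 => hmem m hm1 (by omega))
    · simp only [dif_neg h]
      have : lo = j := by omega
      rw [this]

-- In a sorted list, the elements < x are exactly the first countP-many.
lemma sorted_lt_iff (x : Int) : ∀ (s : List Int), List.Pairwise (· ≤ ·) s →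
    ∀ (m : ℕ) (hm : m < s.length), (s[m] < x ↔ m < s.countP (fun y => decide (y < x))) := by
  intro s
  induction s with
  | nil => intro _ m hm; simp at hm
  | cons y t ih =>
    intro hp m hm
    rw [List.pairwise_cons] at hp
    have hzero : ¬ y < x → (y :: t).countP (fun y => decide (y < x)) = 0 := by
      intro hy
      rw [List.countP_eq_zero]
      intro b hb
      rcases List.mem_cons.mp hb with rfl | hb'
      · simpa using hy
      · have := hp.1 b hb'
        simp only [decide_eq_true_eq]
        omega
    cases m with
    | zero =>
      simp only [List.getElem_cons_zero]
      constructor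
      · intro hy
        have : (y :: t).countP (fun y => decide (y < x)) ≠ 0 := by
          simp [hy]
        omega
      · intro hc
        by_contra hy0
        rw [hzero hy0] at hc
        omega
    | succ m =>
      simp only [List.getElem_cons_succ]
      by_cases hy : y < x
      · rw [List.countP_cons, if_pos (by simpa using hy)]
        have := ih hp.2 m (by simpa using hm)
        omega
      · rw [hzero hy]
        have hm' : m < t.length := by simpa using hm
        have h1 : y ≤ t[m] := hp.1 _ (List.getElem_mem hm')
        constructor
        · intro h2; omega
        · intro h2; omega

-- setting the element right after a prefix
lemma pvSetJunction (l₁ : List Int) (y x : Int) (l₂ : List Int) (n : ℕ) (hn : n = l₁.length) :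
    (l₁ ++ y :: l₂).set n x = l₁ ++ x :: l₂ := by
  subst hn
  rw [List.set_append_right _ _ (le_refl _)]
  simp

-- evaluating one iteration of A's outer loop on the invariant state
lemma pvStepA_eval (v s : List Int) (i : ℕ) (comp : Int)
    (h1 : 1 ≤ i) (h2 : i < v.length) (hlen : s.length = i)
    (hsort : List.Pairwise (· ≤ ·) s) (hperm : s.Perm (v.take i)) :
    ∃ s' : List Int, s'.length = i + 1 ∧ List.Pairwise (· ≤ ·) s' ∧ s'.Perm (v.take (i + 1)) ∧
      pvStepA (s ++ v.drop i, comp, 2 * ((i : Int) - 1)) (i : Int) =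
        (s' ++ v.drop (i + 1), pvStepB v comp (i : Int), 2 * (((i : Int) + 1) - 1)) := by
  have hx := h2
  set x := v[i] with hxdef
  set jn := s.countP (fun y => decide (y < x)) with hjdef
  have hjle : jn ≤ i := hlen ▸ List.countP_le_length
  have hdrop : v.drop i = x :: v.drop (i + 1) := List.drop_eq_getElem_cons h2
  set a := s ++ v.drop i with ha
  have halen : a.length = v.length := by
    simp only [ha, List.length_append, List.length_drop, hlen]; omega
  have hidx : ∀ (k : ℕ) (hk : k < i), (s[k]'(by rw [hlen]; omega) < x ↔ k < jn) :=
    fun k hk => sorted_lt_iff x s hsort k (by rw [hlen]; omega)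
  -- vetor[i]
  have hchave : PySem.List.pyGetD a (i : Int) 0 = x := by
    rw [PySem.List.pyGetD_natCast, ha, List.getD_append_right _ _ _ _ (le_of_eq hlen), hdrop, hlen]
    simp
  -- the binary search
  have hbis : pvBisectLoop a x 0 (i : Int) 2 = ((jn : Int), pvStepsLoop 0 (i : Int) (jn : Int) 2) := by
    apply pvBisectLoop_eq a x (jn : Int) ((i : Int) - 0).toNat 0 (i : Int) 2 rfl (le_refl 0)
      (Int.natCast_nonneg jn) (by exact_mod_cast hjle)
    intro m hm0 hmi
    have hk : m.toNat < i := by omega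
    have hget : PySem.List.pyGetD a m 0 = s[m.toNat]'(by omega) := by
      rw [PySem.List.pyGetD_eq_getElem a 0 hm0 (by omega)]
      exact List.getElem_append_left (by rw [hlen]; omega)
    rw [hget, hidx m.toNat hk]
    omega
  -- the three slices
  have hsl1 : PySem.List.slice a none (some ((jn : Int) + 1)) = a.take (jn + 1) := by
    rw [show ((jn : Int) + 1) = ((jn + 1 : ℕ) : Int) by push_cast; ring,
      PySem.List.slice_to_natCast]
  have hsl2 : PySem.List.slice a (some (jn : Int)) (some (i : Int)) = (a.drop jn).take (i - jn) :=
    PySem.List.slice_natCast a jn i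
  have hsl3 : PySem.List.slice a (some ((i : Int) + 1)) none = a.drop (i + 1) := by
    rw [show ((i : Int) + 1) = ((i + 1 : ℕ) : Int) by push_cast; ring,
      PySem.List.slice_from_natCast]
  have hc2 : (a.drop jn).take (i - jn) = s.drop jn := by
    rw [ha, List.drop_append_of_le_length (by omega),
      List.take_append_of_le_length (by simp [hlen]),
      List.take_of_length_le (by simp [hlen])]
  have hc3 : a.drop (i + 1) = v.drop (i + 1) := by
    have e : a.drop i = v.drop i := by
      rw [ha, List.drop_append_of_le_length (le_of_eq hlen.symm), ← hlen, List.drop_length]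
      simp
    rw [← List.drop_drop, e, List.drop_drop]
  -- the updated array
  set s' : List Int := s.take jn ++ x :: s.drop jn with hs'
  have hw : (a.take (jn + 1) ++ (s.drop jn ++ v.drop (i + 1))).set jn x = s' ++ v.drop (i + 1) := by
    rcases Nat.lt_or_ge jn i with hcase | hcase
    · have e1 : a.take (jn + 1) = s.take jn ++ [s[jn]'(by omega)] := by
        rw [ha, List.take_append_of_le_length (by omega),
          List.take_succ_eq_append_getElem (by omega)]
      rw [e1, List.append_assoc, List.singleton_append,
        pvSetJunction (s.take jn) _ x _ jn (by simp [hlen]; omega)]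
      simp [hs']
    · have hji : jn = i := by omega
      have e1 : a.take (jn + 1) = s ++ [x] := by
        rw [ha, hdrop, hji, show i + 1 = s.length + 1 by omega, List.take_append]
        simp
      have e2 : s.drop jn = [] := by rw [hji, ← hlen, List.drop_length]
      rw [e1, e2]
      have e3 : (s ++ [x]) ++ ([] ++ v.drop (i + 1)) = s ++ x :: v.drop (i + 1) := by simp
      rw [e3, pvSetJunction s x x _ jn (by omega)]
      simp [hs', hji, ← hlen, List.drop_length]
  -- properties of the new sorted prefix
  have hlen' : s'.length = i + 1 := by
    simp only [hs', List.length_append, List.length_take, List.length_cons, List.length_drop, hlen]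
    omega
  have hxle : ∀ b ∈ s.drop jn, x ≤ b := by
    intro b hb
    obtain ⟨k, hk, rfl⟩ := List.mem_iff_getElem.mp hb
    have hk' : jn + k < i := by simp [hlen] at hk; omega
    rw [List.getElem_drop]
    have := (hidx (jn + k) hk')
    omega
  have hltx : ∀ b ∈ s.take jn, b < x := by
    intro b hb
    obtain ⟨k, hk, rfl⟩ := List.mem_iff_getElem.mp hb
    have hk' : k < jn := by simp [hlen] at hk; omega
    rw [List.getElem_take]
    exact (hidx k (by omega)).mpr hk'
  have hsort' : List.Pairwise (· ≤ ·) s' := by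
    rw [hs', List.pairwise_append]
    refine ⟨hsort.take, List.pairwise_cons.mpr ⟨hxle, hsort.drop⟩, ?_⟩
    intro b hb c hc
    rcases List.mem_cons.mp hc with rfl | hc'
    · exact le_of_lt (hltx b hb)
    · exact le_trans (le_of_lt (hltx b hb)) (hxle c hc')
  have hperm' : s'.Perm (v.take (i + 1)) := by
    have e1 : s'.Perm (x :: s) := by
      have := List.perm_middle (a := x) (l₁ := s.take jn) (l₂ := s.drop jn)
      simp only [List.take_append_drop] at this
      exact hs' ▸ this
    have e2 : (x :: s).Perm (x :: v.take i) := hperm.cons x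
    have e3 : v.take (i + 1) = v.take i ++ [x] := List.take_succ_eq_append_getElem h2
    have e4 : (v.take i ++ [x]).Perm (x :: v.take i) := by
      have h := List.perm_middle (a := x) (l₁ := v.take i) (l₂ := ([] : List Int))
      simp only [List.append_nil] at h
      exact h
    exact (e1.trans e2).trans (e3 ▸ e4.symm)
  -- B's step
  have hB : pvStepB v comp (i : Int) = comp + 2 + pvStepsLoop 0 (i : Int) (jn : Int) 0 := by
    simp only [pvStepB, pvSearchSteps]
    rw [PySem.List.pyGetD_natCast, List.getD_eq_getElem _ _ h2, ← hxdef,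
      PySem.List.slice_to_natCast,
      PySem.List.foldl_ite_add_one (p := fun y => y < x)]
    have : (v.take i).countP (fun y => decide (y < x)) = jn := by
      rw [hjdef]
      exact (List.Perm.countP_congr hperm fun y _ => rfl).symm
    rw [this]
    simp
  -- assemble
  refine ⟨s', hlen', hsort', hperm', ?_⟩
  show pvStepA (a, comp, 2 * ((i : Int) - 1)) (i : Int) = _
  unfold pvStepA
  simp only [hchave, hbis, hsl1, hsl2, hsl3, hc2, hc3]
  rw [PySem.List.pySetD_natCast, List.append_assoc, hw,
    pvStepsLoop_shift ((i : Int) - 0).toNat 0 (i : Int) (jn : Int) 2 rfl, hB]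
  refine Prod.ext rfl (Prod.ext ?_ ?_) <;> simp <;> ring

-- Invariant of A's outer loop after the iterations 1..i-1: the array is a sorted permutation of
-- the first i elements followed by the untouched tail, comparacoes equals B's running sum, trocas = 2(i-1).
lemma pvMaster (v : List Int) : ∀ (i : ℕ), 1 ≤ i → i ≤ v.length →
    ∃ s : List Int, s.length = i ∧ List.Pairwise (· ≤ ·) s ∧ s.Perm (v.take i) ∧
      (PySem.List.pyRange 1 (i : Int) 1).foldl pvStepA (v, (0 : Int), (0 : Int)) =
        (s ++ v.drop i, (PySem.List.pyRange 1 (i : Int) 1).foldl (pvStepB v) 0, 2 * ((i : Int) - 1)) := by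
  intro i hi
  induction i, hi using Nat.le_induction with
  | base =>
    intro hle
    refine ⟨v.take 1, by simp; omega, ?_, List.Perm.refl _, ?_⟩
    · rcases v with _ | ⟨y, t⟩
      · simp at hle
      · simp
    · rw [show ((1 : ℕ) : Int) = 1 by norm_num, PySem.List.pyRange_one_eq_nil (le_refl 1)]
      simp only [List.foldl_nil]
      rw [List.take_append_drop]
      refine Prod.ext rfl (Prod.ext rfl ?_)
      norm_num
  | succ i hi ih =>
    intro hle
    obtain ⟨s, hlen, hsort, hperm, heq⟩ := ih (by omega)
    obtain ⟨s', hlen', hsort', hperm', hstep⟩ :=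
      pvStepA_eval v s i ((PySem.List.pyRange 1 (i : Int) 1).foldl (pvStepB v) 0)
        hi (by omega) hlen hsort hperm
    refine ⟨s', hlen', hsort', hperm', ?_⟩
    rw [show (((i + 1 : ℕ)) : Int) = (i : Int) + 1 by push_cast; ring,
      PySem.List.pyRange_one_succ_right (by exact_mod_cast hi : (1 : Int) ≤ (i : Int)),
      List.foldl_append, List.foldl_append, heq]
    simp only [List.foldl_cons, List.foldl_nil]
    rw [hstep]

-- ===== VERDICT (by name: the statement is the Claim_ definition above) =====
theorem insertion_sort_comparasoes_spec : Claim_equal_insertion_sort_comparasoes := by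
  intro v _
  unfold Spec_insertion_sort_comparasoes insertion_sort_comparasoes insertion_sort_comparasoes_alt
  rcases Nat.eq_zero_or_pos v.length with h0 | h1
  · rw [List.length_eq_zero_iff] at h0; subst h0; rfl
  · obtain ⟨s, hlen, hsort, hperm, heq⟩ := pvMaster v v.length h1 le_rfl
    rw [heq]
    simp only
    congr 1
    rcases Nat.lt_or_ge 1 v.length with h2 | h2
    · rw [if_pos (by exact_mod_cast h2)]
    · have : v.length = 1 := by omega
      rw [this]; norm_num
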